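-- pv_equiv track=rewrite | github.com/Yanko-7/cad-data-scripts | furniture-dataset/analyze_and_build.py | with_duplicate_suffix
-- ===== SOURCE A (Python) =====
-- from collections import Counter
--
-- def with_duplicate_suffix(ids: list[str]) -> list[str]:
--     seen = Counter()
--     out = []
--     for id_ in ids:
--         seen[id_] += 1
--         n = seen[id_]
--         out.append(id_ if n == 1 else f"{id_}__{n}")
--     return out
-- ===== SOURCE B (Python) =====
-- def with_duplicate_suffix(ids: list[str]) -> list[str]:
--     # Two phases: (1) build an index id -> list of positions where it occurs,
--     # (2) allocate the output and fill it group by group: the bare id at its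
--     # first position, "id__k" at its k-th position (k >= 2).
--     positions = {}
--     for i, id_ in enumerate(ids):
--         positions.setdefault(id_, []).append(i)
--     out = [""] * len(ids)
--     for id_, idxs in positions.items():
--         out[idxs[0]] = id_
--         for k, i in enumerate(idxs[1:], start=2):
--             out[i] = f"{id_}__{k}"
--     return out
-- ===== Notes on version B (the rewrite author's own statement) =====
-- stated objective: alternative
-- what changed: Replaces A's single stateful pass with a running Counter by a two-phase algorithm: first build an index mapping each id to the list of positions where it occurs, then allocate the output and fill it group by group, writing the bare id at its first position and id__k at its k-th position.
import Mathlib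
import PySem

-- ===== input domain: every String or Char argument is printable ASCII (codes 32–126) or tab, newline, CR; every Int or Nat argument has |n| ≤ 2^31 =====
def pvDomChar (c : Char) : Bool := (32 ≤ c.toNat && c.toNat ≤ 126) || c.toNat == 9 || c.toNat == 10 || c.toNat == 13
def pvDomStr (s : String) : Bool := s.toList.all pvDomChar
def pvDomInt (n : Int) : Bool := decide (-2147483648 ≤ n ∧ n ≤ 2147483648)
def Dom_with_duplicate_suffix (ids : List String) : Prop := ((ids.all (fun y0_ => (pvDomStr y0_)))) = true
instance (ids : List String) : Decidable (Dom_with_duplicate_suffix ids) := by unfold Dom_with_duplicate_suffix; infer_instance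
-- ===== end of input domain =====

-- B replaces A's single running-Counter pass by a two-phase algorithm: build an
-- id -> positions index, then fill a preallocated output group by group
-- (alternative decomposition, same asymptotic cost).


-- ===== PORT A =====
-- seen = Counter(); for id_ in ids: seen[id_] += 1; n = seen[id_]; out.append(...)
def with_duplicate_suffix (ids : List String) : List String :=
  (ids.foldl
    (fun (st : PySem.Dict String Int × List String) id_ =>
      let seen := st.1.insert id_ (st.1.getD id_ 0 + 1)
      let n := seen.getD id_ 0
      (seen, st.2 ++ [if n == 1 then id_ else id_ ++ "__" ++ PySem.Int.toStr n]))
    (PySem.Dict.empty, [])).2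

-- ===== PORT B =====
-- phase 1: positions = {}; for i, id_ in enumerate(ids): positions.setdefault(id_, []).append(i)
--          (setdefault-then-append is Dict.modify with default [])
-- phase 2: out = [""] * len(ids); for id_, idxs in positions.items():
--            out[idxs[0]] = id_; for k, i in enumerate(idxs[1:], start=2): out[i] = f"{id_}__{k}"
--          (indices are nonnegative by construction, so .toNat list assignment is exact)
def with_duplicate_suffix_alt (ids : List String) : List String :=
  let positions : PySem.Dict String (List Int) :=
    (PySem.List.enumerate ids 0).foldl
      (fun d p => d.modify p.2 [] (fun l => l ++ [p.1])) PySem.Dict.empty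
  let out0 : List String := List.replicate ids.length ""
  positions.items.foldl
    (fun out pr =>
      match pr.2 with
      | [] => out
      | i0 :: rest =>
        (PySem.List.enumerate rest 2).foldl
          (fun o q => o.set q.2.toNat (pr.1 ++ "__" ++ PySem.Int.toStr q.1))
          (out.set i0.toNat pr.1))
    out0

-- ===== PRECONDITION & SPEC =====
def Spec_with_duplicate_suffix (ids : List String) (out : List String) : Prop := out = with_duplicate_suffix_alt ids
instance (ids : List String) (out : List String) : Decidable (Spec_with_duplicate_suffix ids out) := by unfold Spec_with_duplicate_suffix; infer_instance

-- ===== CLAIM (what is proved, stated in full; the proofs are below) =====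
def Claim_equal_with_duplicate_suffix : Prop := ∀ (ids : List String), Dom_with_duplicate_suffix ids → Spec_with_duplicate_suffix ids (with_duplicate_suffix ids)

-- ===== LEMMAS AND PROOFS =====

-- the value the function puts at position j: ids[j], suffixed by the count of ids[j] in ids[:j+1] when that count is > 1
def pvTarget (ids : List String) (j : Nat) : String :=
  let x := ids.getD j ""
  let n : Int := ((ids.take (j + 1)).count x : Int)
  if n == 1 then x else x ++ "__" ++ PySem.Int.toStr n

-- canonical left-to-right form shared by both proofs
def pvCanon (pre rest : List String) : List String :=
  match rest with
  | [] => []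
  | x :: r =>
    (let n : Int := (pre.count x : Int) + 1
     if n == 1 then x else x ++ "__" ++ PySem.Int.toStr n) :: pvCanon (pre ++ [x]) r

-- positions (as Nats) where s occurs in ids
def pvOccN (ids : List String) (s : String) : List Nat :=
  (List.range ids.length).filter (fun j => ids.getD j "" == s)

-- the (index, value) writes one dict group performs, in order
def pvGroupW (pr : String × List Int) : List (Nat × String) :=
  match pr.2 with
  | [] => []
  | i0 :: rest =>
    (i0.toNat, pr.1) ::
      (PySem.List.enumerate rest 2).map (fun q => (q.2.toNat, pr.1 ++ "__" ++ PySem.Int.toStr q.1))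

-- all writes B performs, in order
def pvWrites (ids : List String) : List (Nat × String) :=
  ((PySem.Set.ofList ids).map (fun s => (s, (pvOccN ids s).map Int.ofNat))).flatMap pvGroupW

-- ---- A-side ----
theorem pvA_loop (rest : List String) : ∀ (seen : PySem.Dict String Int) (acc pre : List String),
    (∀ s, seen.getD s 0 = (pre.count s : Int)) →
    (rest.foldl
      (fun (st : PySem.Dict String Int × List String) id_ =>
        let seen := st.1.insert id_ (st.1.getD id_ 0 + 1)
        let n := seen.getD id_ 0
        (seen, st.2 ++ [if n == 1 then id_ else id_ ++ "__" ++ PySem.Int.toStr n]))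
      (seen, acc)).2 = acc ++ pvCanon pre rest := by
  induction rest with
  | nil => intro seen acc pre h; simp [pvCanon]
  | cons x r ih =>
    intro seen acc pre h
    have hins : ∀ s, (seen.insert x (seen.getD x 0 + 1)).getD s 0 = (((pre ++ [x]).count s : Nat) : Int) := by
      intro s
      have := PySem.Dict.getD_foldl_insert_add_one (l := [x]) (d := seen) (v := s)
      simp [List.foldl] at this
      rw [this, h s]
      simp [List.count_append]
    have hx : (seen.insert x (seen.getD x 0 + 1)).getD x 0 = (pre.count x : Int) + 1 := by
      simp [hins x, List.count_append]
    simp only [List.foldl_cons]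
    rw [ih _ _ (pre ++ [x]) hins]
    simp [pvCanon, hx, List.append_assoc]

theorem pvCanon_eq (rest : List String) : ∀ (pre : List String),
    pvCanon pre rest = (List.range rest.length).map (fun k => pvTarget (pre ++ rest) (pre.length + k)) := by
  induction rest with
  | nil => intro pre; simp [pvCanon]
  | cons x r ih =>
    intro pre
    rw [pvCanon, List.length_cons, List.range_succ_eq_map, List.map_cons, List.map_map]
    congr 1
    · have hx : (pre ++ x :: r).getD pre.length "" = x := by
        rw [List.getD_eq_getElem?_getD]
        simp
      have ht : (pre ++ x :: r).take (pre.length + 1) = pre ++ [x] := by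
        rw [show pre ++ x :: r = (pre ++ [x]) ++ r by simp]
        rw [List.take_append_of_le_length (by simp)]
        simp
      simp only [pvTarget, Nat.add_zero, hx, ht, List.count_append]
      norm_num
    · rw [ih (pre ++ [x])]
      apply List.map_congr_left
      intro k _
      simp only [Function.comp]
      rw [show (pre ++ [x]) ++ r = pre ++ x :: r by simp]
      congr 1
      simp
      omega

-- ---- occurrence-rank facts ----
theorem pvFilter_range_get (p : Nat → Bool) : ∀ (n k i : Nat),
    ((List.range n).filter p)[k]? = some i →
    i < n ∧ p i = true ∧ ((List.range (i + 1)).filter p).length = k + 1 := by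
  intro n
  induction n with
  | zero => intro k i h; simp at h
  | succ n ih =>
    intro k i h
    rw [List.range_succ, List.filter_append] at h
    rcases Nat.lt_or_ge k ((List.range n).filter p).length with hk | hk
    · rw [List.getElem?_append_left hk] at h
      have := ih k i h
      exact ⟨by omega, this.2.1, this.2.2⟩
    · rw [List.getElem?_append_right hk] at h
      by_cases hp : p n
      · rw [show List.filter p [n] = [n] from by simp [hp]] at h
        have hlen : k - ((List.range n).filter p).length < 1 := by
          by_contra hc
          rw [List.getElem?_eq_none (by simpa using Nat.le_of_not_lt hc)] at h
          simp at h
        have hk0 : k = ((List.range n).filter p).length := by omega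
        have hin : i = n := by
          rw [show k - ((List.range n).filter p).length = 0 by omega] at h
          simpa using h.symm
        refine ⟨by omega, by rw [hin]; exact hp, ?_⟩
        rw [hin, List.range_succ, List.filter_append,
          show List.filter p [n] = [n] from by simp [hp]]
        simp [hk0]
      · rw [show List.filter p [n] = [] from by simp [hp]] at h
        simp at h

theorem pvCount_take (ids : List String) (s : String) : ∀ (m : Nat), m ≤ ids.length →
    (ids.take m).count s = ((List.range m).filter (fun j => ids.getD j "" == s)).length := by
  intro m
  induction m with
  | zero => intro _; simp
  | succ m ih =>
    intro hm
    have hmlt : m < ids.length := by omega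
    rw [List.take_add_one, List.range_succ, List.filter_append, List.count_append,
      ih (by omega), List.getElem?_eq_getElem hmlt]
    by_cases hs : ids[m] == s
    · simp [List.getD, List.getElem?_eq_getElem hmlt, List.count_singleton, hs]
    · simp [List.getD, List.getElem?_eq_getElem hmlt, List.count_singleton, hs]

theorem pvTarget_of_occ (ids : List String) (s : String) (k j : Nat)
    (h : (pvOccN ids s)[k]? = some j) :
    j < ids.length ∧
      pvTarget ids j = (if k = 0 then s else s ++ "__" ++ PySem.Int.toStr ((k : Int) + 1)) := by
  obtain ⟨hj, hp, hlen⟩ := pvFilter_range_get _ ids.length k j h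
  have hx : ids.getD j "" = s := by simpa using hp
  have hc : (ids.take (j + 1)).count s = k + 1 := by
    rw [pvCount_take ids s (j + 1) (by omega)]
    exact hlen
  refine ⟨hj, ?_⟩
  unfold pvTarget
  simp only [hx, hc]
  by_cases hk : k = 0
  · simp [hk]
  · have hcast : (((k + 1 : Nat)) : Int) = (k : Int) + 1 := by push_cast; ring
    rw [if_neg hk, hcast]
    have hne : (((k : Int) + 1) == 1) = false := by simp; omega
    simp [hne]

-- ---- generic fold-of-writes facts ----
theorem pvFoldl_set_getElem? (ws : List (Nat × String)) (g : Nat → String) : ∀ (out : List String),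
    (∀ w ∈ ws, w.1 < out.length ∧ w.2 = g w.1) → ∀ (j : Nat),
    (ws.foldl (fun o w => o.set w.1 w.2) out)[j]? =
      if ws.any (fun w => w.1 == j) then some (g j) else out[j]? := by
  induction ws with
  | nil => intro out _ j; simp
  | cons w ws ih =>
    intro out h j
    simp only [List.foldl_cons]
    have hw := h w (List.mem_cons_self)
    rw [ih (out.set w.1 w.2)
      (by intro v hv; simpa [List.length_set] using h v (List.mem_cons_of_mem _ hv)) j]
    by_cases hws : ws.any (fun w => w.1 == j)
    · simp [hws, List.any_cons]
    · simp only [hws, List.any_cons, Bool.or_eq_true]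
      rw [List.getElem?_set]
      by_cases hij : w.1 = j
      · subst hij; simp [hw.1, hw.2]
      · simp [hij]

-- ---- B-side ----
theorem pvEnum_eq (ids : List String) :
    PySem.List.enumerate ids 0 = (List.range ids.length).map (fun (j : Nat) => ((j : Int), ids.getD j "")) := by
  rw [PySem.List.enumerate_eq_map_pyRange ids "", PySem.List.len_eq, PySem.List.pyRange_zero_natCast,
    List.map_map]
  apply List.map_congr_left
  intro j hj
  simp

theorem pvD_items (ids : List String) :
    ((PySem.List.enumerate ids 0).foldl
      (fun d p => d.modify p.2 [] (fun l => l ++ [p.1])) PySem.Dict.empty).items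
    = (PySem.Set.ofList ids).map (fun s => (s, (pvOccN ids s).map Int.ofNat)) := by
  have hnodup : ((PySem.List.enumerate ids 0).foldl
      (fun d p => d.modify p.2 [] (fun l => l ++ [p.1])) PySem.Dict.empty).keys.Nodup := by
    exact PySem.Dict.nodup_keys_foldl_modify_key (PySem.List.enumerate ids 0) (fun p => p.2) []
      (fun _ p => fun l => l ++ [p.1]) PySem.Dict.empty (by simp [PySem.Dict.keys_empty])
  have hkeys : ((PySem.List.enumerate ids 0).foldl
      (fun d p => d.modify p.2 [] (fun l => l ++ [p.1])) PySem.Dict.empty).keys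
      = PySem.Set.ofList ids := by
    rw [PySem.Dict.keys_foldl_modify_key (PySem.List.enumerate ids 0) (fun p => p.2) []
      (fun _ p => fun l => l ++ [p.1]) PySem.Dict.empty]
    rw [PySem.Dict.keys_empty, PySem.List.map_snd_enumerate, PySem.Set.update_nil_left]
  rw [PySem.Dict.items_eq_map_keys _ hnodup [], hkeys]
  apply List.map_congr_left
  intro s hs
  congr 1
  have hswap : (PySem.List.enumerate ids 0).foldl
      (fun d p => d.modify p.2 [] (fun l => l ++ [p.1])) (PySem.Dict.empty : PySem.Dict String (List Int))
      = ((PySem.List.enumerate ids 0).map Prod.swap).foldl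
        (fun d p => d.modify p.1 [] (fun l => l ++ [p.2])) PySem.Dict.empty := by
    rw [List.foldl_map]
    rfl
  rw [hswap, PySem.Dict.getD_foldl_modify_append]
  rw [pvEnum_eq, List.map_map, List.filter_map, List.map_map]
  simp only [PySem.Dict.getD_empty, List.nil_append]
  unfold pvOccN
  rfl

theorem pvB_eq_writes (ids : List String) :
    with_duplicate_suffix_alt ids =
      (pvWrites ids).foldl (fun o w => o.set w.1 w.2) (List.replicate ids.length "") := by
  unfold with_duplicate_suffix_alt
  dsimp only
  rw [pvD_items]
  have hstep : (fun (out : List String) (pr : String × List Int) =>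
      match pr.2 with
      | [] => out
      | i0 :: rest =>
        (PySem.List.enumerate rest 2).foldl
          (fun o q => o.set q.2.toNat (pr.1 ++ "__" ++ PySem.Int.toStr q.1))
          (out.set i0.toNat pr.1))
      = fun out pr => (pvGroupW pr).foldl (fun o w => o.set w.1 w.2) out := by
    funext out pr
    rcases pr with ⟨s, idxs⟩
    cases idxs with
    | nil => simp [pvGroupW]
    | cons i0 rest => simp [pvGroupW, List.foldl_map]
  rw [hstep, pvWrites, ← List.foldl_flatMap]

theorem pvWrites_sound (ids : List String) :
    ∀ w ∈ pvWrites ids, w.1 < ids.length ∧ w.2 = pvTarget ids w.1 := by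
  intro w hw
  rw [pvWrites, List.mem_flatMap] at hw
  obtain ⟨pr, hpr, hwpr⟩ := hw
  rw [List.mem_map] at hpr
  obtain ⟨s, hsmem, rfl⟩ := hpr
  cases hocc : pvOccN ids s with
  | nil => rw [hocc] at hwpr; simp [pvGroupW] at hwpr
  | cons j0 restN =>
    rw [hocc] at hwpr
    simp only [List.map_cons, pvGroupW, List.mem_cons] at hwpr
    rcases hwpr with rfl | hmem
    · have h0 : (pvOccN ids s)[0]? = some j0 := by rw [hocc]; rfl
      have ht := pvTarget_of_occ ids s 0 j0 h0
      simpa using ⟨ht.1, ht.2.symm⟩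
    · rw [List.mem_map] at hmem
      obtain ⟨q, hq, rfl⟩ := hmem
      rw [PySem.List.mem_enumerate_iff] at hq
      obtain ⟨k, hk, rfl⟩ := hq
      have hklen : k < restN.length := by simpa using hk
      have hget : (restN.map Int.ofNat)[k] = Int.ofNat restN[k] := by simp
      have hk' : (pvOccN ids s)[k + 1]? = some restN[k] := by
        rw [hocc]
        simp [hklen]
      have ht := pvTarget_of_occ ids s (k + 1) restN[k] hk'
      have hcast : ((k + 1 : Nat) : Int) + 1 = 2 + (k : Int) := by push_cast; ring
      refine ⟨by simpa [hget] using ht.1, ?_⟩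
      have := ht.2
      rw [if_neg (by omega), hcast] at this
      simpa [hget] using this.symm

theorem pvWrites_cover (ids : List String) (j : Nat) (hj : j < ids.length) :
    (pvWrites ids).any (fun w => w.1 == j) = true := by
  have hjmem : j ∈ pvOccN ids (ids.getD j "") := by
    unfold pvOccN
    simp [List.mem_filter, List.mem_range, hj]
  have hsmem : (ids.getD j "") ∈ PySem.Set.ofList ids := by
    rw [PySem.Set.mem_ofList]
    rw [List.getD_eq_getElem?_getD, List.getElem?_eq_getElem hj]
    exact List.getElem_mem hj
  obtain ⟨k, hklt, hke0⟩ := List.mem_iff_getElem.mp hjmem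
  have hke : (pvOccN ids (ids.getD j ""))[k]? = some j := by
    rw [List.getElem?_eq_getElem hklt, hke0]
  clear hke0 hklt
  rw [List.any_eq_true]
  have hprmem : ((ids.getD j ""), (pvOccN ids (ids.getD j "")).map Int.ofNat)
      ∈ (PySem.Set.ofList ids).map (fun s => (s, (pvOccN ids s).map Int.ofNat)) :=
    List.mem_map.mpr ⟨_, hsmem, rfl⟩
  cases hocc : pvOccN ids (ids.getD j "") with
  | nil => rw [hocc] at hke; simp at hke
  | cons j0 restN =>
    rw [hocc] at hke
    rw [hocc] at hprmem
    cases k with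
    | zero =>
      refine ⟨((Int.ofNat j0).toNat, ids.getD j ""), ?_, ?_⟩
      · rw [pvWrites, List.mem_flatMap]
        exact ⟨_, hprmem, by simp [pvGroupW]⟩
      · simp at hke ⊢
        omega
    | succ k' =>
      have hke' : restN[k']? = some j := by simpa using hke
      have hk'lt : k' < restN.length := (List.getElem?_eq_some_iff.mp hke').1
      have hrest : restN[k'] = j := by
        have := List.getElem?_eq_getElem hk'lt
        rw [this] at hke'
        simpa using hke'
      refine ⟨((Int.ofNat j).toNat, (ids.getD j "") ++ "__" ++ PySem.Int.toStr (2 + (k' : Int))), ?_, by simp⟩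
      rw [pvWrites, List.mem_flatMap]
      refine ⟨_, hprmem, ?_⟩
      simp only [pvGroupW, List.map_cons, List.mem_cons]
      right
      rw [List.mem_map]
      refine ⟨(2 + (k' : Int), Int.ofNat j), ?_, by simp⟩
      rw [PySem.List.mem_enumerate_iff]
      exact ⟨k', by simpa using hk'lt, by simp [hrest]⟩

-- ===== VERDICT (by name: the statement is the Claim_ definition above) =====
theorem with_duplicate_suffix_spec : Claim_equal_with_duplicate_suffix := by
  intro ids _
  unfold Spec_with_duplicate_suffix
  have hA : with_duplicate_suffix ids = (List.range ids.length).map (fun k => pvTarget ids k) := by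
    unfold with_duplicate_suffix
    rw [pvA_loop ids PySem.Dict.empty [] [] (by intro s; simp [PySem.Dict.getD])]
    simpa using pvCanon_eq ids []
  rw [hA, pvB_eq_writes]
  apply List.ext_getElem?
  intro j
  rw [pvFoldl_set_getElem? _ (pvTarget ids) _
        (by simpa [List.length_replicate] using pvWrites_sound ids) j]
  by_cases hj : j < ids.length
  · rw [if_pos (pvWrites_cover ids j hj)]
    simp [hj]
  · have : ¬ ((pvWrites ids).any (fun w => w.1 == j) = true) := by
      simp only [List.any_eq_true, not_exists]
      rintro w ⟨hw, hwj⟩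
      exact hj (by simpa [show w.1 = j by simpa using hwj] using (pvWrites_sound ids w hw).1)
    rw [if_neg this]
    simp [hj]
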